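-- pv_equiv track=rewrite | github.com/eliahreeves/spice2sch | main.py | find_content
-- ===== SOURCE A (Python) =====
-- from typing import List, NoReturn, Tuple
--
-- def find_content(file: List[str]) -> List[str]:
--     start = 0
--     for index, line in enumerate(file):
--         line = line.strip()
--         if line.lower().startswith(".subckt"):
--             start = index
--         elif line.lower().startswith(".ends"):
--             return file[start : index + 1]
--
--     raise ValueError("Invalid format")
-- ===== SOURCE B (Python) =====
-- from typing import List
--
--
-- def _matches(line: str, prefix: str) -> bool:
--     return line.strip().lower().startswith(prefix)
--
--
-- def find_content(file: List[str]) -> List[str]: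
--     try:
--         end = next(i for i, line in enumerate(file) if _matches(line, ".ends"))
--     except StopIteration:
--         raise ValueError("Invalid format")
--     start = next((i for i in range(end - 1, -1, -1) if _matches(file[i], ".subckt")), 0)
--     return file[start:end + 1]
-- ===== Notes on version B (the rewrite author's own statement) =====
-- stated objective: alternative
-- what changed: Instead of one forward pass carrying a running 'start' accumulator, B first finds the index of the first '.ends' line, then scans backward from it for the nearest preceding '.subckt' (defaulting to 0) and slices.
import Mathlib
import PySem

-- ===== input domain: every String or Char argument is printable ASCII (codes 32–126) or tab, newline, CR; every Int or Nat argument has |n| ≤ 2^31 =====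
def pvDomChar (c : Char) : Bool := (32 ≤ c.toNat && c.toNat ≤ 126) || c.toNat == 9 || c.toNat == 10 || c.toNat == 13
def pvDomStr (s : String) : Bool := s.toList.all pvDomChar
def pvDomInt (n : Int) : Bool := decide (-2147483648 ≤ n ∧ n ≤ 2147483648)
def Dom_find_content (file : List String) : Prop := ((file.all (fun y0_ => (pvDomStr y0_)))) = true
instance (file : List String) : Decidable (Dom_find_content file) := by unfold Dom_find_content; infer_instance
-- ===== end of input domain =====

-- B replaces A's single forward pass carrying a running 'start' by: find the first '.ends'
-- index, then search backward from it for the nearest '.subckt' (default 0); objective: alternative decomposition, same cost.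
-- Both Pythons raise ValueError when no line matches '.ends'; Pre_ admits exactly the inputs with such a line.

-- ===== PORT A =====
-- A's loop: enumerate with a running 'start'; returns file[start:index+1] at the first '.ends'.
def find_content_loop (file : List String) : List String → Nat → Nat → List String
  | [], _, _ => []   -- Python raises ValueError here; excluded by Pre_
  | line :: rest, index, start =>
    let l := PySem.Str.strip line
    if PySem.Str.startswith (PySem.Str.lower l) ".subckt" then
      find_content_loop file rest (index + 1) index
    else if PySem.Str.startswith (PySem.Str.lower l) ".ends" then
      PySem.List.slice file (some (start : Int)) (some ((index : Int) + 1))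
    else
      find_content_loop file rest (index + 1) start

def find_content (file : List String) : List String :=
  find_content_loop file file 0 0

-- ===== PORT B =====
def pvMatches (line : String) (pre : String) : Bool :=
  PySem.Str.startswith (PySem.Str.lower (PySem.Str.strip line)) pre

def find_content_alt (file : List String) : List String :=
  match file.findIdx? (fun line => pvMatches line ".ends") with
  | none => []   -- Python raises ValueError here; excluded by Pre_
  | some e =>
    -- range(e-1, -1, -1): indices below e, scanned backward; default 0
    let start := (((List.range e).reverse.find?
        (fun i => pvMatches (file.getD i "") ".subckt")).getD 0)
    PySem.List.slice file (some (start : Int)) (some ((e : Int) + 1))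

-- ===== PRECONDITION & SPEC =====
-- Pre_ excludes exactly the inputs with no line whose strip().lower() starts with '.ends':
-- there both Pythons raise ValueError.
def Pre_find_content (file : List String) : Prop :=
  (file.any (fun line => pvMatches line ".ends")) = true
instance (file : List String) : Decidable (Pre_find_content file) := by
  unfold Pre_find_content; infer_instance

def pvWitness_find_content : List String := [".subckt inv a b", "m1 x y", ".ends"]

def Spec_find_content (file : List String) (out : List String) : Prop := out = find_content_alt file
instance (file : List String) (out : List String) : Decidable (Spec_find_content file out) := by unfold Spec_find_content; infer_instance

-- ===== CLAIM (what is proved, stated in full; the proofs are below) =====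
def Claim_equal_find_content : Prop := ∀ (file : List String), Dom_find_content file → Pre_find_content file → Spec_find_content file (find_content file)

-- ===== LEMMAS AND PROOFS =====

-- a line starting with ".subckt" does not start with ".ends"
lemma not_ends_of_subckt (l : String)
    (h : PySem.Str.startswith (PySem.Str.lower l) ".subckt" = true) :
    PySem.Str.startswith (PySem.Str.lower l) ".ends" = false := by
  by_contra hc
  rw [Bool.not_eq_false] at hc
  rw [PySem.Str.startswith, PySem.Chars.startswith_iff] at h hc
  rcases List.prefix_or_prefix_of_prefix h hc with hp | hp <;> revert hp <;> decide

-- the main loop invariant: running the loop on the suffix file.drop index with accumulator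
-- start computes B's answer for that suffix (default start instead of 0).
lemma loop_char (file : List String) :
    ∀ (rest : List String) (index start : Nat), rest = file.drop index →
    find_content_loop file rest index start =
      match rest.findIdx? (fun line => pvMatches line ".ends") with
      | none => []
      | some k =>
        PySem.List.slice file
          (some ((((List.range' index k).reverse.find?
              (fun i => pvMatches (file.getD i "") ".subckt")).getD start : Nat) : Int))
          (some (((index + k : Nat) : Int) + 1)) := by
  intro rest
  induction rest with
  | nil => intro index start _; simp [find_content_loop]
  | cons line rest ih =>
    intro index start hdrop
    have hline : file.getD index "" = line := by
      have : file[index]? = some line := by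
        have := congrArg (fun l => l.head?) hdrop
        simpa [List.head?_drop] using this.symm
      simp [List.getD, this]
    have hdrop' : rest = file.drop (index + 1) := by
      have := congrArg List.tail hdrop
      simpa [List.tail_drop] using this
    by_cases hs : PySem.Str.startswith (PySem.Str.lower (PySem.Str.strip line)) ".subckt" = true
    · have hne : pvMatches line ".ends" = false := not_ends_of_subckt _ hs
      rw [find_content_loop]
      rw [if_pos hs]
      rw [ih (index + 1) index hdrop']
      rw [List.findIdx?_cons]
      simp only [hne, Bool.false_eq_true, if_false]
      cases hfi : rest.findIdx? (fun line => pvMatches line ".ends") with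
      | none => simp
      | some k =>
        simp only [Option.map_some]
        have hrange : List.range' index (k + 1) = index :: List.range' (index + 1) k := by
          simp [List.range'_succ]
        rw [hrange]
        simp only [List.reverse_cons, List.find?_append]
        have hpidx : pvMatches (file.getD index "") ".subckt" = true := by
          rw [hline]; exact hs
        have harith : index + (k + 1) = index + 1 + k := by omega
        cases hf : (List.range' (index + 1) k).reverse.find?
            (fun i => pvMatches (file.getD i "") ".subckt") with
        | none =>
          simp only [Option.none_or, List.find?_cons, hpidx, Option.getD_some,
            Option.getD_none]
          rw [harith]
        | some j =>
          simp only [Option.some_or, Option.getD_some]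
          rw [harith]
    · by_cases he : pvMatches line ".ends" = true
      · rw [find_content_loop]
        rw [if_neg hs, if_pos (by simpa [pvMatches] using he)]
        rw [List.findIdx?_cons]
        simp only [he, if_true]
        simp [List.range'_zero]
      · rw [find_content_loop]
        rw [if_neg hs, if_neg (by simpa [pvMatches] using he)]
        rw [ih (index + 1) start hdrop']
        rw [List.findIdx?_cons]
        have he3 : pvMatches line ".ends" = false := by simpa using he
        simp only [he3, Bool.false_eq_true, if_false]
        cases hfi : rest.findIdx? (fun line => pvMatches line ".ends") with
        | none => simp
        | some k =>
          simp only [Option.map_some]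
          have hrange : List.range' index (k + 1) = index :: List.range' (index + 1) k := by
            simp [List.range'_succ]
          rw [hrange]
          simp only [List.reverse_cons, List.find?_append]
          have hpidx : pvMatches (file.getD index "") ".subckt" = false := by
            rw [hline]; simpa [pvMatches] using hs
          have harith : index + (k + 1) = index + 1 + k := by omega
          cases hf : (List.range' (index + 1) k).reverse.find?
              (fun i => pvMatches (file.getD i "") ".subckt") with
          | none =>
            simp only [Option.none_or, List.find?_cons, hpidx, List.find?_nil,
              Option.getD_none]
            rw [harith]
          | some j =>
            simp only [Option.some_or, Option.getD_some]
            rw [harith]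

-- ===== VERDICT (by name: the statement is the Claim_ definition above) =====
theorem find_content_spec : Claim_equal_find_content := by
  intro file _ hpre
  unfold Spec_find_content find_content find_content_alt
  rw [loop_char file file 0 0 (by simp)]
  cases hfi : file.findIdx? (fun line => pvMatches line ".ends") with
  | none =>
    exfalso
    unfold Pre_find_content at hpre
    rw [List.any_eq_true] at hpre
    rcases hpre with ⟨x, hx, hpx⟩
    have := List.findIdx?_eq_none_iff.mp hfi x hx
    simp [hpx] at this
  | some e => simp [List.range_eq_range']
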